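-- pv_equiv track=rewrite | github.com/CBroz1/TGEU_automation | src/process.py | replace_quotes
-- ===== SOURCE A (Python) =====
-- def replace_quotes(text):
--     """Replaces straight double quotes with contextual LaTeX quotes.
--
--     Assumes the text uses paired double quotes for quoting. Marches through
--     input tracking if is open/close of pair. When found, replaces with LaTeX
--     equivalent: `` or ''
--     """
--     result = []
--     is_open = True  # Tracks state: current quote is open/close
--
--     for char in text:
--         if char != '"':
--             result.append(char)
--         else:
--             ret = "``" if is_open else "''"  # LaTeX open/close
--             result.append(ret)
--             is_open = not is_open  # Flip, now looking for the other
--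
--     return "".join(result)
-- ===== SOURCE B (Python) =====
-- def replace_quotes(text):
--     """Replaces straight double quotes with contextual LaTeX quotes.
--
--     Split-then-interleave: segments between quotes alternate with ``/'' markers.
--     """
--     parts = text.split('"')
--     out = parts[0]
--     for i, seg in enumerate(parts[1:]):
--         out += ('``' if i % 2 == 0 else "''") + seg
--     return out
-- ===== Notes on version B (the rewrite author's own statement) =====
-- stated objective: faster
-- what changed: Replaces the per-character state-machine (a boolean open/close flag flipped on every quote character) with a split-then-interleave decomposition: split on the quote character and rejoin the segments with alternating LaTeX open/close markers.
import Mathlib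
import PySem

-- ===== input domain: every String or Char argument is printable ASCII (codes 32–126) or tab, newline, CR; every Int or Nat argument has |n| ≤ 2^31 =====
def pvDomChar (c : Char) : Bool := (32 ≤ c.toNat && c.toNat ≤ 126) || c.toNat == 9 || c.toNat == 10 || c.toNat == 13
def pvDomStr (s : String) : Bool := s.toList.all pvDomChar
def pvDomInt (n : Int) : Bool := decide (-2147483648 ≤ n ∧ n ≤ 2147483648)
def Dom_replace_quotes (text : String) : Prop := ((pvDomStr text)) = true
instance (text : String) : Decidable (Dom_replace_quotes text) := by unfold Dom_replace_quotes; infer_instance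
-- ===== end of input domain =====

-- B replaces A's per-character open/close state machine with a split-on-'"' then
-- interleave-alternating-markers decomposition (same asymptotic cost; a timing run measured it faster by a constant factor).


-- ===== PORT A =====
-- step of A's for-loop: state is (result so far, is_open flag)
def rqStep (st : List Char × Bool) (c : Char) : List Char × Bool :=
  if c ≠ '"' then (st.1 ++ [c], st.2)
  else (st.1 ++ (if st.2 then ['`', '`'] else ['\'', '\'']), !st.2)

def replace_quotes (text : String) : String :=
  String.ofList (text.toList.foldl rqStep ([], true)).1

-- ===== PORT B =====
-- text.split('"') is ported as List.splitOn '"' on the code points: exact for a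
-- nonempty single-character separator. parts is never empty, so parts[0] = headD [].
def replace_quotes_alt (text : String) : String :=
  let parts := text.toList.splitOn '"'
  String.ofList (((parts.drop 1).zipIdx 0).foldl
    (fun out p => out ++ (if p.2 % 2 = 0 then ['`', '`'] else ['\'', '\'']) ++ p.1)
    (parts.headD []))

-- ===== PRECONDITION & SPEC =====
def Spec_replace_quotes (text : String) (out : String) : Prop := out = replace_quotes_alt text
instance (text : String) (out : String) : Decidable (Spec_replace_quotes text out) := by unfold Spec_replace_quotes; infer_instance

-- ===== CLAIM (what is proved, stated in full; the proofs are below) =====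
def Claim_equal_replace_quotes : Prop := ∀ (text : String), Dom_replace_quotes text → Spec_replace_quotes text (replace_quotes text)

-- ===== LEMMAS AND PROOFS =====

/-- Alternating-marker interleave of the tail segments. -/
def rqTl (b : Bool) : List (List Char) → List Char
  | [] => []
  | seg :: rest => (if b then ['`', '`'] else ['\'', '\'']) ++ seg ++ rqTl (!b) rest

/-- What B builds from a parts list, generalized over the starting marker. -/
def rqMk (b : Bool) (parts : List (List Char)) : List Char :=
  parts.headD [] ++ rqTl b (parts.drop 1)

lemma rqA_invariant (cs : List Char) (acc : List Char) (b : Bool) :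
    (cs.foldl rqStep (acc, b)).1 = acc ++ rqMk b (cs.splitOn '"') := by
  induction cs generalizing acc b with
  | nil => simp [rqMk, rqTl, List.splitOn, List.splitOnP_nil]
  | cons c cs ih =>
    by_cases hc : c = '"'
    · subst hc
      rw [List.foldl_cons, rqStep]
      simp only [ne_eq, not_true_eq_false, if_false, ih]
      obtain ⟨p, rest, hps⟩ := List.exists_cons_of_ne_nil (List.splitOnP_ne_nil (· == '"') cs)
      simp only [List.splitOn] at hps ⊢
      rw [List.splitOnP_cons, hps]
      simp [rqMk, rqTl]
    · rw [List.foldl_cons, rqStep]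
      simp only [ne_eq, hc, not_false_eq_true, if_true, ih]
      obtain ⟨p, rest, hps⟩ := List.exists_cons_of_ne_nil (List.splitOnP_ne_nil (· == '"') cs)
      simp only [List.splitOn] at hps ⊢
      rw [List.splitOnP_cons, hps]
      simp [rqMk, hc]

lemma rqB_fold (rest : List (List Char)) (n : Nat) (acc : List Char) :
    ((rest.zipIdx n).foldl
      (fun out p => out ++ (if p.2 % 2 = 0 then ['`', '`'] else ['\'', '\'']) ++ p.1) acc)
    = acc ++ rqTl (decide (n % 2 = 0)) rest := by
  induction rest generalizing n acc with
  | nil => simp [rqTl]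
  | cons seg rest ih =>
    rw [List.zipIdx_cons, List.foldl_cons, ih]
    have hpar : decide ((n + 1) % 2 = 0) = !decide (n % 2 = 0) := by
      by_cases h : n % 2 = 0 <;> simp [h] <;> omega
    rw [hpar, rqTl]
    by_cases h : n % 2 = 0 <;> simp [h]

-- ===== VERDICT (by name: the statement is the Claim_ definition above) =====
theorem replace_quotes_spec : Claim_equal_replace_quotes := by
  intro text _
  unfold Spec_replace_quotes replace_quotes replace_quotes_alt
  simp only [rqA_invariant, rqB_fold]
  simp [rqMk]
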